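-- pv_equiv track=rewrite | github.com/dojinkimm/AlgorithmPractice | programmers/binary_budget.py | solution
-- ===== SOURCE A (Python) =====
-- def in_limit(cut, bud):
--     add = 0
--     for b in bud:
--         add += min(cut, b)
--
--     return add
--
-- def solution(budgets, M):
--     answer = 0
--     if sum(budgets) <= M:
--         return max(budgets)
--     lo = 0
--     hi = max(budgets)
--
--     while lo <= hi:
--         mid = (lo + hi) // 2
--
--         summed = in_limit(mid, budgets)
--         if summed <= M:
--             lo = mid + 1
--             answer = mid
--         else:
--             hi = mid - 1
--
--     return answer
-- ===== SOURCE B (Python) =====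
-- def solution(budgets, M):
--     if sum(budgets) <= M:
--         return max(budgets)
--     bs = sorted(budgets)
--     n = len(bs)
--     pref = 0
--     for i, b in enumerate(bs):
--         k = n - i  # number of budgets still capped by the cut on this segment
--         if pref + b * k > M:
--             # threshold lies in this linear segment: pref + t*k <= M < pref + (t+1)*k
--             t = (M - pref) // k
--             return max(t, 0)
--         pref += b
--     return 0  # unreachable: the last check is sum(bs) > M, which holds here
-- ===== Notes on version B (the rewrite author's own statement) =====
-- stated objective: faster
-- what changed: Replaces the binary search over cut values (each step re-summing min(cut,b) over the whole list) by sort + one prefix-sum scan that solves the piecewise-linear threshold pref + cut*k <= M directly with one floor division.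
import Mathlib
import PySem

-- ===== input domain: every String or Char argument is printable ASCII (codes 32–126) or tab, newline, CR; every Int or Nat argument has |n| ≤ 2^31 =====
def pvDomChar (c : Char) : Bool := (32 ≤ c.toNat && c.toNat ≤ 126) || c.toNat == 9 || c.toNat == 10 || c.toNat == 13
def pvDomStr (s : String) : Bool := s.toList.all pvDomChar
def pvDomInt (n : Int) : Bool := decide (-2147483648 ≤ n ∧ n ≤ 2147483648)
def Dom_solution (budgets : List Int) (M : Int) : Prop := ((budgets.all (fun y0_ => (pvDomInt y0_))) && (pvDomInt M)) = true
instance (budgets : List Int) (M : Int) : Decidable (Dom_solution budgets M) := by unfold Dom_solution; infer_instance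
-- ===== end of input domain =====

-- B replaces A's binary search over cut values by sort + one prefix-sum scan that solves the
-- piecewise-linear threshold directly (return value only; neither program mutates its arguments).

-- ===== PORT A =====
def in_limit (cut : Int) (bud : List Int) : Int :=
  bud.foldl (fun add b => add + min cut b) 0

-- the while loop of A, state (lo, hi, answer); the Nat fuel only makes the loop total:
-- it is called with fuel = (hi + 1 - lo).toNat and each iteration shrinks hi + 1 - lo by at least 1
def solutionLoop (budgets : List Int) (M : Int) : Nat → Int → Int → Int → Int
  | 0, _, _, answer => answer  -- never reached (see loop_spec's fuel invariant)
  | fuel + 1, lo, hi, answer =>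
    if lo ≤ hi then
      let mid := PySem.Int.floordiv (lo + hi) 2
      let summed := in_limit mid budgets
      if summed ≤ M then solutionLoop budgets M fuel (mid + 1) hi mid
      else solutionLoop budgets M fuel lo (mid - 1) answer
    else answer

def solution (budgets : List Int) (M : Int) : Int :=
  if budgets.sum ≤ M then (PySem.List.max? budgets (fun x => x)).getD 0  -- max([]) raises: [] is excluded by Pre_
  else
    solutionLoop budgets M (((PySem.List.max? budgets (fun x => x)).getD 0 + 1)).toNat 0
      ((PySem.List.max? budgets (fun x => x)).getD 0) 0

-- ===== PORT B =====
-- the for loop of Source B over the sorted list: pref = sum of the consumed prefix, k = len(rest)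
def scanB (M pref : Int) : List Int → Int
  | [] => 0  -- Source B's dead final 'return 0': its last check is 'sum > M', which holds there
  | b :: rest =>
    let k : Int := (rest.length : Int) + 1
    if pref + b * k > M then max (PySem.Int.floordiv (M - pref) k) 0
    else scanB M (pref + b) rest

def solution_alt (budgets : List Int) (M : Int) : Int :=
  if budgets.sum ≤ M then (PySem.List.max? budgets (fun x => x)).getD 0  -- max([]) raises: [] is excluded by Pre_
  else scanB M 0 (PySem.List.sorted budgets (fun x => x) false)

-- ===== PRECONDITION & SPEC =====
-- Pre_ excludes only the empty list, on which A's max(budgets) raises ValueError.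
def Pre_solution (budgets : List Int) (M : Int) : Prop := budgets ≠ []
instance (budgets : List Int) (M : Int) : Decidable (Pre_solution budgets M) := by unfold Pre_solution; infer_instance
def pvWitness_solution : List Int × Int := ([1, 2, 3], 4)

def Spec_solution (budgets : List Int) (M : Int) (out : Int) : Prop := out = solution_alt budgets M
instance (budgets : List Int) (M : Int) (out : Int) : Decidable (Spec_solution budgets M out) := by unfold Spec_solution; infer_instance

-- ===== CLAIM (what is proved, stated in full; the proofs are below) =====
def Claim_equal_solution : Prop := ∀ (budgets : List Int) (M : Int), Dom_solution budgets M → Pre_solution budgets M → Spec_solution budgets M (solution budgets M)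

-- ===== LEMMAS AND PROOFS =====

-- in_limit is the Python sum(min(cut, b) for b in bud)
lemma in_limit_eq_sum (c : Int) (bud : List Int) :
    in_limit c bud = (bud.map (fun b => min c b)).sum := by
  simpa using PySem.List.foldl_add (l := bud) (a := 0) (g := fun b => min c b)

lemma in_limit_mono {c c' : Int} (bud : List Int) (h : c ≤ c') :
    in_limit c bud ≤ in_limit c' bud := by
  rw [in_limit_eq_sum, in_limit_eq_sum]
  exact List.sum_le_sum (fun b _ => min_le_min h le_rfl)

lemma in_limit_perm (c : Int) {bud bud' : List Int} (h : bud.Perm bud') :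
    in_limit c bud = in_limit c bud' := by
  rw [in_limit_eq_sum, in_limit_eq_sum]
  exact (h.map _).sum_eq

-- on a split u ++ v with u below the cut and v above it, in_limit is linear in the cut
lemma in_limit_segment (c : Int) {u v : List Int}
    (hu : ∀ b ∈ u, b ≤ c) (hv : ∀ b ∈ v, c ≤ b) :
    in_limit c (u ++ v) = u.sum + c * (v.length : Int) := by
  rw [in_limit_eq_sum, List.map_append, List.sum_append]
  congr 1
  · have : u.map (fun b => min c b) = u.map (fun b => b) :=
      List.map_congr_left (fun b hb => min_eq_right (hu b hb))
    rw [this, List.map_id']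
  · have : v.map (fun b => min c b) = v.map (fun _ => c) :=
      List.map_congr_left (fun b hb => min_eq_left (hv b hb))
    rw [this, PySem.List.sum_map_const_int]
    ring

-- the threshold t with in_limit t ≤ M < in_limit (t+1) is unique
lemma threshold_unique {bud : List Int} {M t t' : Int}
    (h : in_limit t bud ≤ M ∧ M < in_limit (t + 1) bud)
    (h' : in_limit t' bud ≤ M ∧ M < in_limit (t' + 1) bud) : t = t' := by
  by_contra hne
  rcases lt_or_gt_of_ne hne with hlt | hlt
  · exact absurd (le_trans (in_limit_mono bud (by omega : t + 1 ≤ t')) h'.1) (not_le.mpr h.2)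
  · exact absurd (le_trans (in_limit_mono bud (by omega : t' + 1 ≤ t)) h.1) (not_le.mpr h'.2)

-- A's loop: given enough fuel and its invariants, the result is 0 with in_limit 0 > M, or the threshold
lemma loop_spec (bud : List Int) (M : Int) :
    ∀ (fuel : Nat) (lo hi answer : Int), (hi + 1 - lo).toNat ≤ fuel → 0 ≤ lo →
    (lo = 0 → answer = 0) →
    (0 < lo → answer = lo - 1 ∧ in_limit (lo - 1) bud ≤ M) →
    (∀ c, hi < c → M < in_limit c bud) →
    (solutionLoop bud M fuel lo hi answer = 0 ∧ M < in_limit 0 bud) ∨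
    (0 ≤ solutionLoop bud M fuel lo hi answer ∧
      in_limit (solutionLoop bud M fuel lo hi answer) bud ≤ M ∧
      M < in_limit (solutionLoop bud M fuel lo hi answer + 1) bud) := by
  intro fuel
  induction fuel with
  | zero =>
    intro lo hi answer hfuel hlo h0 hpos hhi
    have hexit : hi < lo := by omega
    rw [solutionLoop]
    rcases eq_or_lt_of_le hlo with heq | hlt
    · exact Or.inl ⟨(h0 heq.symm).symm ▸ rfl, hhi 0 (by omega)⟩
    · obtain ⟨ha, hf⟩ := hpos hlt
      refine Or.inr ⟨by omega, ha ▸ hf, ?_⟩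
      have : M < in_limit lo bud := hhi lo (by omega)
      simpa [ha] using this
  | succ n ih =>
    intro lo hi answer hfuel hlo h0 hpos hhi
    rw [solutionLoop]
    by_cases h : lo ≤ hi
    · have hmid := PySem.Int.floordiv_two_mid_bounds h
      simp only [if_pos h]
      by_cases hle : in_limit (PySem.Int.floordiv (lo + hi) 2) bud ≤ M
      · simp only [if_pos hle]
        apply ih
        · omega
        · omega
        · omega
        · intro _
          constructor
          · ring
          · simpa using hle
        · exact hhi
      · simp only [if_neg hle]
        apply ih _ _ _ (by omega) hlo h0 hpos
        intro c hc
        calc M < in_limit (PySem.Int.floordiv (lo + hi) 2) bud := by simpa using not_le.mp hle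
          _ ≤ in_limit c bud := in_limit_mono bud (by omega)
    · simp only [if_neg h]
      rcases eq_or_lt_of_le hlo with heq | hlt
      · exact Or.inl ⟨(h0 heq.symm).symm ▸ rfl, hhi 0 (by omega)⟩
      · obtain ⟨ha, hf⟩ := hpos hlt
        refine Or.inr ⟨by omega, ha ▸ hf, ?_⟩
        have : M < in_limit lo bud := hhi lo (by omega)
        simpa [ha] using this

-- B's scan over the sorted list, with the invariant 'sorted = u ++ v, pref = sum u,
-- and the largest consumed element p still satisfied sum u + p * |v| ≤ M'
lemma scanB_spec (M : Int) :
    ∀ (v u : List Int), (u ++ v).Pairwise (· ≤ ·) → M < (u ++ v).sum → v ≠ [] →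
    (u = [] ∨ ∃ p ∈ u, (∀ b ∈ u, b ≤ p) ∧ u.sum + p * (v.length : Int) ≤ M) →
    ∃ t, scanB M u.sum v = max t 0 ∧
      in_limit t (u ++ v) ≤ M ∧ M < in_limit (t + 1) (u ++ v) := by
  intro v
  induction v with
  | nil => intro u _ _ hne _; exact absurd rfl hne
  | cons b0 rs ih =>
    intro u hpw hsum _ hp
    have hk : (0:Int) < (rs.length : Int) + 1 := by positivity
    have hub0 : ∀ b ∈ u, b ≤ b0 := by
      intro b hb
      exact (List.pairwise_append.mp hpw).2.2 b hb b0 (List.mem_cons_self ..)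
    have hb0rs : ∀ b ∈ rs, b0 ≤ b :=
      fun b hb => (List.pairwise_cons.mp (List.pairwise_append.mp hpw).2.1).1 b hb
    by_cases hfail : u.sum + b0 * ((rs.length : Int) + 1) > M
    · -- Source B returns here: the threshold lies in this linear segment
      set t : Int := PySem.Int.floordiv (M - u.sum) ((rs.length : Int) + 1) with htdef
      have hbr : t * ((rs.length : Int) + 1) ≤ M - u.sum ∧
          M - u.sum < (t + 1) * ((rs.length : Int) + 1) :=
        (PySem.Int.floordiv_eq_iff_of_pos hk).mp htdef.symm
      have htb0 : t < b0 := by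
        have : t * ((rs.length : Int) + 1) < b0 * ((rs.length : Int) + 1) := by omega
        exact lt_of_mul_lt_mul_right this (le_of_lt hk)
      have hut : ∀ b ∈ u, b ≤ t := by
        intro b hb
        rcases hp with hnil | ⟨p, hpu, hmax, hple⟩
        · simp [hnil] at hb
        · have hple' : u.sum + p * ((rs.length : Int) + 1) ≤ M := by
            simp only [List.length_cons] at hple; push_cast at hple; omega
          have : p < t + 1 :=
            lt_of_mul_lt_mul_right
              (by omega : p * ((rs.length : Int) + 1) < (t + 1) * ((rs.length : Int) + 1))
              (le_of_lt hk)
          exact le_trans (hmax b hb) (by omega)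
      have hvt : ∀ b ∈ b0 :: rs, t ≤ b := by
        intro b hb
        rcases List.mem_cons.mp hb with rfl | hb
        · omega
        · exact le_trans (by omega) (hb0rs b hb)
      have hvt1 : ∀ b ∈ b0 :: rs, t + 1 ≤ b := by
        intro b hb
        rcases List.mem_cons.mp hb with rfl | hb
        · omega
        · exact le_trans (by omega) (hb0rs b hb)
      refine ⟨t, ?_, ?_, ?_⟩
      · rw [scanB]
        simp only [if_pos (show M < u.sum + b0 * ((rs.length:Int)+1) from hfail)]
        rw [htdef]
      · rw [in_limit_segment t hut hvt]
        simp only [List.length_cons]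
        push_cast
        omega
      · rw [in_limit_segment (t+1) (fun b hb => le_trans (hut b hb) (by omega)) hvt1]
        simp only [List.length_cons]
        push_cast
        omega
    · -- Source B moves on: pref += b0
      rw [not_lt] at hfail
      have hrs : rs ≠ [] := by
        rintro rfl
        simp at hsum hfail
        omega
      have := ih (u ++ [b0]) (by simpa using hpw) (by simpa using hsum) hrs
        (Or.inr ⟨b0, by simp, ?_, ?_⟩)
      · obtain ⟨t, hres, h1, h2⟩ := this
        refine ⟨t, ?_, by simpa using h1, by simpa using h2⟩
        rw [scanB]
        simp only [if_neg (show ¬ M < u.sum + b0 * ((rs.length:Int)+1) from not_lt.mpr hfail)]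
        simpa using hres
      · intro b hb
        rcases List.mem_append.mp hb with hb | hb
        · exact hub0 b hb
        · simp at hb; omega
      · have hdist : b0 * ((rs.length : Int) + 1) = b0 * (rs.length : Int) + b0 := by ring
        simp only [List.sum_append, List.sum_cons, List.sum_nil]
        omega

-- ===== VERDICT (by name: the statement is the Claim_ definition above) =====
theorem solution_spec : Claim_equal_solution := by
  intro budgets M _ hPre
  unfold Spec_solution
  by_cases hs : budgets.sum ≤ M
  · simp [solution, solution_alt, hs]
  · simp only [solution, solution_alt, if_neg hs]
    have hM : M < budgets.sum := not_le.mp hs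
    have hperm : (PySem.List.sorted budgets (fun x => x) false).Perm budgets :=
      PySem.List.sorted_perm ..
    have hpw : (PySem.List.sorted budgets (fun x => x) false).Pairwise (· ≤ ·) := by
      simpa using PySem.List.sorted_pairwise (xs := budgets) (key := fun x => x)
    have hnil : PySem.List.sorted budgets (fun x => x) false ≠ [] := by
      intro h
      exact hPre ((PySem.List.sorted_eq_nil_iff _ _ _).mp h)
    obtain ⟨t, hres, hft, hft1⟩ :=
      scanB_spec M (PySem.List.sorted budgets (fun x => x) false) [] (by simpa using hpw)
        (by simpa [hperm.sum_eq] using hM) hnil (Or.inl rfl)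
    simp only [List.nil_append, List.sum_nil] at hres hft hft1
    rw [in_limit_perm t hperm] at hft
    rw [in_limit_perm (t + 1) hperm] at hft1
    cases hmax : PySem.List.max? budgets (fun x => x) with
    | none => exact absurd ((PySem.List.max?_eq_none_iff _ _).mp hmax) hPre
    | some m =>
      have hhi : ∀ c, m < c → M < in_limit c budgets := by
        intro c hc
        have hseg := in_limit_segment c (u := budgets) (v := [])
          (fun b hb => le_trans (PySem.List.max?_isMax hmax b hb) (le_of_lt hc))
          (by simp)
        simp only [List.append_nil, List.length_nil, Nat.cast_zero, mul_zero, add_zero] at hseg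
        rw [hseg]
        exact hM
      have hA := loop_spec budgets M (m + 1).toNat 0 m 0 (by omega) le_rfl (fun _ => rfl)
        (fun h => absurd h (lt_irrefl 0)) hhi
      simp only [Option.getD_some]
      rcases hA with ⟨h0, hgt⟩ | ⟨hnn, hle, hgt⟩
      · rw [h0, hres]
        have ht0 : t < 0 := by
          by_contra hge
          rw [not_lt] at hge
          exact absurd (le_trans (in_limit_mono budgets hge) hft) (not_le.mpr hgt)
        omega
      · have heq := threshold_unique ⟨hle, hgt⟩ ⟨hft, hft1⟩
        rw [hres, ← heq]
        omega
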